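-- pv_equiv track=rewrite | github.com/252180478yark-lang/omni | services/knowledge-engine/app/services/harvester.py | _seq_pos_from_sequence
-- ===== SOURCE A (Python) =====
-- def _seq_pos_from_sequence(sequence: list | None) -> dict[str, int] | None:
--     """Map block_id → position from API block_sequence (document visual order)."""
--     if not sequence:
--         return None
--     pos: dict[str, int] = {}
--     for i, bid in enumerate(sequence):
--         s = str(bid)
--         if s not in pos:
--             pos[s] = i
--     return pos or None
-- ===== SOURCE B (Python) =====
-- def _seq_pos_from_sequence(sequence):
--     """Map block_id -> first position. Two guard-free stages: a dict built from the
--     reversed label/index zip (later writes carry smaller indices, so the first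
--     occurrence wins by plain overwrite), then an ordered comprehension over the
--     labels deduped in first-occurrence order."""
--     if not sequence:
--         return None
--     labels = [str(b) for b in sequence]
--     first = dict(zip(reversed(labels), reversed(range(len(labels)))))
--     return {s: first[s] for s in dict.fromkeys(labels)}
-- ===== Notes on version B (the rewrite author's own statement) =====
-- stated objective: alternative
-- what changed: Instead of A's single guarded loop growing a dict entry by entry, B stringifies the sequence once, builds a dict from the reversed label/index zip so the first occurrence wins by unconditional overwrite, and emits the result as a comprehension over the labels deduped in first-occurrence order (dict.fromkeys); A's membership guard and incremental enumerate loop disappear.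
import Mathlib
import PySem

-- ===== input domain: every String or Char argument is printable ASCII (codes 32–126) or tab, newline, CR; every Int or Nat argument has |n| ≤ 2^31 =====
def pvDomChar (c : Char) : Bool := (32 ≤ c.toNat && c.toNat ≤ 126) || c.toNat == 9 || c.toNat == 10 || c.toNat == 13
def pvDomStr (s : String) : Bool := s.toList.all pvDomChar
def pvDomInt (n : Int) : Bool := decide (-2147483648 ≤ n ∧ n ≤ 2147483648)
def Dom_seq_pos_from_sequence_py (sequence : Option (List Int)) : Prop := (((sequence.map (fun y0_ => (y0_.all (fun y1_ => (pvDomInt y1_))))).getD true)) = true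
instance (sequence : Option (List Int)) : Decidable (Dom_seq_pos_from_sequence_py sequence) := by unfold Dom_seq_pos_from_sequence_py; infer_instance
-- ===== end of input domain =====

-- B replaces A's guarded incremental dict build by a reverse zip-dict (first occurrence wins
-- by overwrite) plus an ordered comprehension over deduped labels (alternative; no speed claim).

-- ===== PORT A =====
-- A's loop body: insert position i only if the stringified id is not yet a key
def pvAStep (d : PySem.Dict String Int) (p : Int × Int) : PySem.Dict String Int :=
  if d.contains (PySem.Int.toStr p.2) then d else d.insert (PySem.Int.toStr p.2) p.1

def seq_pos_from_sequence_py (sequence : Option (List Int)) : Option (List (String × Int)) :=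
  match sequence with
  | none => none
  | some xs =>
    if xs = [] then none
    else
      let pos := (PySem.List.enumerate xs).foldl pvAStep PySem.Dict.empty
      if pos.items = [] then none else some pos.items

-- ===== PORT B =====
-- B's dict(zip(...)) build: plain insert, later pairs overwrite
def pvBIns (d : PySem.Dict String Int) (p : String × Int) : PySem.Dict String Int :=
  d.insert p.1 p.2

-- first[s] in Source B never raises (s is drawn from dict.fromkeys(labels) and every label is a
-- key of first); the .getD 0 on the lookup is therefore exact.
def seq_pos_from_sequence_py_alt (sequence : Option (List Int)) : Option (List (String × Int)) :=
  match sequence with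
  | none => none
  | some xs =>
    if xs = [] then none
    else
      let labels := xs.map PySem.Int.toStr
      let first := (labels.reverse.zip (PySem.List.pyRange 0 labels.length 1).reverse).foldl
        pvBIns PySem.Dict.empty
      some ((PySem.List.dedup labels).map (fun s => (s, first.getD s 0)))

-- ===== PRECONDITION & SPEC =====
def Spec_seq_pos_from_sequence_py (sequence : Option (List Int)) (out : Option (List (String × Int))) : Prop := out = seq_pos_from_sequence_py_alt sequence
instance (sequence : Option (List Int)) (out : Option (List (String × Int))) : Decidable (Spec_seq_pos_from_sequence_py sequence out) := by unfold Spec_seq_pos_from_sequence_py; infer_instance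

-- ===== CLAIM =====
def Claim_equal_seq_pos_from_sequence_py : Prop := ∀ (sequence : Option (List Int)), Dom_seq_pos_from_sequence_py sequence → Spec_seq_pos_from_sequence_py sequence (seq_pos_from_sequence_py sequence)

-- ===== LEMMAS AND PROOFS =====

-- A's fold: keys accumulate as a set update with the stringified ids
theorem pv_keysA (l : List (Int × Int)) (d : PySem.Dict String Int) :
    (l.foldl pvAStep d).keys = PySem.Set.update d.keys (l.map (fun p => PySem.Int.toStr p.2)) := by
  induction l generalizing d with
  | nil => simp [PySem.Set.update_nil]
  | cons p t ih =>
    simp only [List.foldl_cons, List.map_cons, PySem.Set.update_cons, ih]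
    congr 1
    by_cases hc : d.contains (PySem.Int.toStr p.2)
    · rw [pvAStep, if_pos hc, PySem.Set.add_of_mem]
      exact (PySem.Dict.contains_iff_mem_keys _ _).mp hc
    · rw [pvAStep, if_neg hc, PySem.Dict.keys_insert_of_not_contains _ _ (by simpa using hc),
        PySem.Set.add_of_not_mem]
      exact fun h => hc ((PySem.Dict.contains_iff_mem_keys _ _).mpr h)

-- A's fold: lookup is the first occurrence (find?) unless the accumulator already has the key
theorem pv_getA (l : List (Int × Int)) (d : PySem.Dict String Int) (k : String) :
    (l.foldl pvAStep d).get? k =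
      if d.contains k then d.get? k
      else (l.find? (fun p => PySem.Int.toStr p.2 == k)).map (·.1) := by
  induction l generalizing d with
  | nil =>
    simp only [List.foldl_nil, List.find?_nil, Option.map_none]
    split_ifs with h
    · rfl
    · exact (PySem.Dict.get?_eq_none_iff_contains _ _).mpr (by simpa using h)
  | cons p t ih =>
    simp only [List.foldl_cons, ih, List.find?_cons]
    by_cases hc : d.contains (PySem.Int.toStr p.2)
    · rw [pvAStep, if_pos hc]
      by_cases hk : d.contains k
      · simp [hk]
      · have hne : ¬ (PySem.Int.toStr p.2 == k) = true := by
          intro h; exact hk (by rwa [← eq_of_beq h])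
        simp [hk, hne]
    · rw [pvAStep, if_neg hc]
      by_cases he : PySem.Int.toStr p.2 = k
      · subst he
        simp [PySem.Dict.contains_insert_self, PySem.Dict.get?_insert_self, hc]
      · have hbe : ¬ (PySem.Int.toStr p.2 == k) = true := by simpa using he
        have hcont : (d.insert (PySem.Int.toStr p.2) p.1).contains k = d.contains k := by
          rw [PySem.Dict.contains_insert]
          simp [show ¬ (k == PySem.Int.toStr p.2) = true by simpa using (Ne.symm he)]
        rw [hcont, PySem.Dict.get?_insert_of_ne _ _ (Ne.symm he)]
        simp [hbe]

-- first matching index in the enumeration = index? of the stringified list, shifted by the start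
theorem pv_find_enum (k : String) (xs : List Int) (s : Int) :
    ((PySem.List.enumerate xs s).find? (fun p => PySem.Int.toStr p.2 == k)).map (·.1) =
      (PySem.List.index? (xs.map PySem.Int.toStr) k).map (fun n => s + (n : Int)) := by
  induction xs generalizing s with
  | nil => simp [PySem.List.enumerate_nil]
  | cons x t ih =>
    rw [PySem.List.enumerate_cons, List.map_cons, List.find?_cons]
    by_cases he : PySem.Int.toStr x = k
    · subst he
      rw [PySem.List.index?_cons_self]
      simp
    · have hbe : (PySem.Int.toStr x == k) = false := by simpa using he
      rw [PySem.List.index?_cons_of_ne _ he]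
      simp only [hbe]
      rw [ih]
      cases PySem.List.index? (t.map PySem.Int.toStr) k with
      | none => simp
      | some n => simp; omega

-- keys of A's finished dict = dedup of the stringified sequence
theorem pv_keysA_dedup (xs : List Int) :
    ((PySem.List.enumerate xs).foldl pvAStep PySem.Dict.empty).keys =
      PySem.List.dedup (xs.map PySem.Int.toStr) := by
  rw [pv_keysA]
  simp only [PySem.Dict.keys_empty, PySem.Set.update_nil_left]
  have hmap : (PySem.List.enumerate xs).map (fun p => PySem.Int.toStr p.2) =
      xs.map PySem.Int.toStr := by
    have := PySem.List.map_snd_enumerate xs (s := 0)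
    calc (PySem.List.enumerate xs).map (fun p => PySem.Int.toStr p.2)
        = ((PySem.List.enumerate xs).map (·.2)).map PySem.Int.toStr := by
          rw [List.map_map]; rfl
      _ = xs.map PySem.Int.toStr := by rw [this]
  rw [hmap, PySem.List.dedup_eq_ofList]

theorem pv_nodupA (xs : List Int) :
    ((PySem.List.enumerate xs).foldl pvAStep PySem.Dict.empty).keys.Nodup := by
  rw [pv_keysA_dedup]; exact PySem.List.nodup_dedup _

-- B's reverse-built dict: lookup is the FIRST matching pair of the unreversed list
theorem pv_getRev (l : List (String × Int)) (d : PySem.Dict String Int) (k : String) :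
    (l.reverse.foldl pvBIns d).get? k =
      match l.find? (fun p => p.1 == k) with
      | some p => some p.2
      | none => d.get? k := by
  induction l generalizing d with
  | nil => simp
  | cons p t ih =>
    simp only [List.reverse_cons, List.foldl_append, List.foldl_cons, List.foldl_nil,
      List.find?_cons]
    by_cases he : p.1 = k
    · subst he
      simp [pvBIns, PySem.Dict.get?_insert_self]
    · have hbe : (p.1 == k) = false := by simpa using he
      rw [pvBIns, PySem.Dict.get?_insert_of_ne _ _ (Ne.symm he), ih]
      simp [hbe]

-- zipping the reversals = reversing the zip (for equal lengths)
theorem pv_zip_rev {α β : Type} (l : List α) (r : List β) (h : l.length = r.length) :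
    l.reverse.zip r.reverse = (l.zip r).reverse := by
  induction l generalizing r with
  | nil => simp
  | cons x t ih =>
    cases r with
    | nil => simp at h
    | cons y u =>
      simp only [List.length_cons, Nat.add_right_cancel_iff] at h
      simp only [List.reverse_cons, List.zip_cons_cons]
      rw [List.zip_append (by simpa using h), ih u h]
      simp

-- first match in the label/index zip = index? of the labels, shifted by the start
theorem pv_find_zip (k : String) (ls : List String) (s : Int) :
    (ls.zip (PySem.List.pyRange s (s + ls.length) 1)).find? (fun p => p.1 == k) =
      (PySem.List.index? ls k).map (fun n => (k, s + (n : Int))) := by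
  induction ls generalizing s with
  | nil => simp [PySem.List.pyRange_one_eq_nil (le_refl s)]
  | cons x t ih =>
    rw [PySem.List.pyRange_one_cons (by simp only [List.length_cons]; push_cast; omega)]
    rw [List.zip_cons_cons, List.find?_cons]
    by_cases he : x = k
    · subst he
      rw [PySem.List.index?_cons_self]
      simp
    · have hbe : (x == k) = false := by simpa using he
      rw [PySem.List.index?_cons_of_ne _ he]
      simp only [hbe]
      have hr : s + (1 : Int) + (t.length : Int) = s + ((x :: t).length : Int) := by
        simp only [List.length_cons]; push_cast; omega
      rw [show PySem.List.pyRange (s + 1) (s + ((x :: t).length : Int)) 1 =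
            PySem.List.pyRange (s + 1) ((s + 1) + (t.length : Int)) 1 by rw [← hr]]
      rw [ih (s + 1)]
      cases PySem.List.index? t k with
      | none => simp
      | some n =>
        simp
        omega

-- lookup in B's dict = first index of the label
theorem pv_getB (xs : List Int) (k : String) :
    (((xs.map PySem.Int.toStr).reverse.zip
        (PySem.List.pyRange 0 ((xs.map PySem.Int.toStr).length : Int) 1).reverse).foldl
      pvBIns PySem.Dict.empty).get? k =
      (PySem.List.index? (xs.map PySem.Int.toStr) k).map (fun n => ((n : Nat) : Int)) := by
  have hlen : (xs.map PySem.Int.toStr).length =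
      (PySem.List.pyRange 0 ((xs.map PySem.Int.toStr).length : Int) 1).length := by
    rw [PySem.List.length_pyRange_one]; simp
  rw [pv_zip_rev _ _ hlen, pv_getRev]
  have := pv_find_zip k (xs.map PySem.Int.toStr) 0
  rw [show (0 : Int) + ((xs.map PySem.Int.toStr).length : Int) =
        ((xs.map PySem.Int.toStr).length : Int) by omega] at this
  rw [this]
  cases PySem.List.index? (xs.map PySem.Int.toStr) k with
  | none => simp
  | some n => simp

-- A's items list IS B's comprehension
theorem pv_itemsA (xs : List Int) :
    ((PySem.List.enumerate xs).foldl pvAStep PySem.Dict.empty).items =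
      (PySem.List.dedup (xs.map PySem.Int.toStr)).map
        (fun s => (s,
          (((xs.map PySem.Int.toStr).reverse.zip
              (PySem.List.pyRange 0 ((xs.map PySem.Int.toStr).length : Int) 1).reverse).foldl
            pvBIns PySem.Dict.empty).getD s 0)) := by
  rw [PySem.Dict.items_eq_map_keys _ (pv_nodupA xs) 0, pv_keysA_dedup]
  apply List.map_congr_left
  intro k hk
  have hmem : k ∈ xs.map PySem.Int.toStr := (PySem.List.mem_dedup _ _).mp hk
  have hget := pv_getA (PySem.List.enumerate xs) PySem.Dict.empty k
  rw [PySem.Dict.getD_eq_get?_getD, hget]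
  simp only [PySem.Dict.contains_empty, Bool.false_eq_true, if_false]
  rw [pv_find_enum k xs 0, PySem.Dict.getD_eq_get?_getD, pv_getB]
  rcases Option.isSome_iff_exists.mp
      ((PySem.List.index?_isSome_iff (xs.map PySem.Int.toStr) k).mpr hmem) with ⟨n, hn⟩
  rw [hn]
  simp

-- on a nonempty sequence A's dict is nonempty (its 'pos or None' tail returns pos)
theorem pv_items_ne (x : Int) (t : List Int) :
    ((PySem.List.enumerate (x :: t)).foldl pvAStep PySem.Dict.empty).items ≠ [] := by
  intro h
  have hk : ((PySem.List.enumerate (x :: t)).foldl pvAStep PySem.Dict.empty).keys = [] := by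
    simp only [PySem.Dict.keys, h, List.map_nil]
  rw [pv_keysA_dedup] at hk
  rw [PySem.List.dedup_eq_ofList, List.map_cons, PySem.Set.ofList_cons] at hk
  exact List.cons_ne_nil _ _ hk

-- ===== VERDICT =====
theorem seq_pos_from_sequence_py_spec : Claim_equal_seq_pos_from_sequence_py := by
  intro sequence _
  unfold Spec_seq_pos_from_sequence_py seq_pos_from_sequence_py seq_pos_from_sequence_py_alt
  cases sequence with
  | none => rfl
  | some xs =>
    cases xs with
    | nil => simp
    | cons x t =>
      simp only [reduceCtorEq, if_false]
      rw [if_neg (pv_items_ne x t), pv_itemsA]
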